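-- pv_equiv track=rewrite | github.com/klee972/exec-filter | nlvr/allennlp-semparse-nlvr-v2/scripts/nlvr_v2/paired_supervision/generate_paired_data.py | convert_abstract_phrase_to_grounded
-- ===== SOURCE A (Python) =====
-- from typing import List, Dict, Tuple
-- import copy
--
-- COLORS = ["yellow", "black", "blue"]
--
-- SHAPES = ["circle", "triangle", "square"]
--
-- NUMBERS = [
--     "one",
--     "two",
--     "three",
--     "four",
--     "five",
--     "six",
--     "seven",
--     "eight",
--     "nine",
-- ]
--
-- number_strings = {
--     "one": "1",
--     "two": "2",
--     "three": "3",
--     "four": "4",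
--     "five": "5",
--     "six": "6",
--     "seven": "7",
--     "eight": "8",
--     "nine": "9",
--     "ten": "10",
-- }
--
-- def convert_abstract_phrase_to_grounded(abstract_phrases: List[str]) -> List[List[str]]:
--     """Convert a set of abstract phrases into multiple grounded sets each set containing a unique combination of
--     abstract token to grounded token mapping.
--     For example, input: ["COLOR1 at the base", "COLOR1 as the base"] would be converted to multiple sets, each one
--     containing one value for the COLOR1 variable
--
--     We currently limit to two colors, two shapes and one number in the phrase.
--     """
--
--     # This contains different equivalent (partially) grounded phrases.
--     grounded_phrases_sets: List[List[str]] = [abstract_phrases]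
--
--     abstractions = ["COLOR1", "COLOR2", "SHAPE1", "SHAPE2", "NUMBER1"]
--     for abstract_token in abstractions:
--         # Go through each possible abstract token in order and expand `grounded_phrases` by considering all possible
--         # groundings of this abstract token
--         new_grounded_phrases_sets = []
--         for equivalent_set in grounded_phrases_sets:
--             # Mutate this set into multiple equivalent sets by replacing the abstract token with all its groundings.
--             # For example, if this set is
--             # ["yellow SHAPE1 at the base"], it should lead to three new sets ["yellow square at the base"],
--             # ["yellow triangle at the base"], and ["yellow circle at the base"].
--             if not all([abstract_token in x for x in equivalent_set]):
--                 # If phrases in this set does not contain the abstract token, mutations cannot be made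
--                 # add this equivalent set to the final sets as it is
--                 new_grounded_phrases_sets.append(equivalent_set)
--                 continue
--             if "COLOR" in abstract_token:
--                 options = COLORS
--             elif "SHAPE" in abstract_token:
--                 options = SHAPES
--             elif "NUMBER" in abstract_token:
--                 options = NUMBERS
--             else:
--                 raise NotImplementedError
--             # This equivalent set would be mutated into as many new sets as grounding options
--             new_equivalent_sets = []
--             for grounding_token in options:
--                 # Each phrase in the current equivalent set will be grounded with this token and added to the new set
--                 new_equivalent_set = []
--                 for phrase in equivalent_set:
--                     new_phrase = phrase.replace(abstract_token, grounding_token)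
--                     new_equivalent_set.append(new_phrase)
--                 if grounding_token in number_strings:
--                     alternate_token = number_strings[grounding_token]
--                     for phrase in equivalent_set:
--                         new_phrase = phrase.replace(abstract_token, alternate_token)
--                         new_equivalent_set.append(new_phrase)
--                 if new_equivalent_set:
--                     new_equivalent_sets.append(new_equivalent_set)
--             # Add these new sets to the new collection
--             new_grounded_phrases_sets.extend(new_equivalent_sets)
--         grounded_phrases_sets = copy.deepcopy(new_grounded_phrases_sets)
--
--     return grounded_phrases_sets
-- ===== SOURCE B (Python) =====
-- COLORS = ["yellow", "black", "blue"]
-- SHAPES = ["circle", "triangle", "square"]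
-- NUMBERS = [
--     "one", "two", "three", "four", "five", "six", "seven", "eight", "nine",
-- ]
-- number_strings = {
--     "one": "1", "two": "2", "three": "3", "four": "4", "five": "5",
--     "six": "6", "seven": "7", "eight": "8", "nine": "9", "ten": "10",
-- }
--
-- def _ground(tokens, phrases):
--     """Depth-first: produce every fully grounded variant of `phrases`, one at a time."""
--     if not tokens:
--         return [phrases]
--     token, rest = tokens[0], tokens[1:]
--     if any(token not in p for p in phrases):
--         return _ground(rest, phrases)
--     if "NUMBER" in token:
--         groups = [[w, number_strings[w]] for w in NUMBERS]
--     elif "SHAPE" in token: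
--         groups = [[w] for w in SHAPES]
--     else:
--         groups = [[w] for w in COLORS]
--     result = []
--     for group in groups:
--         result.extend(_ground(rest, [p.replace(token, g) for g in group for p in phrases]))
--     return result
--
-- def convert_abstract_phrase_to_grounded(abstract_phrases):
--     if not abstract_phrases:
--         return []
--     return _ground(["COLOR1", "COLOR2", "SHAPE1", "SHAPE2", "NUMBER1"], abstract_phrases)
-- ===== Notes on version B (the rewrite author's own statement) =====
-- stated objective: simpler
-- what changed: Replaces A's level-by-level worklist of partially grounded sets (rebuilt and deep-copied after every abstraction token) by a direct depth-first recursion over the token list that emits each fully grounded set once, with the word/digit number groundings expressed as precomputed replacement groups.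
import Mathlib
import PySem

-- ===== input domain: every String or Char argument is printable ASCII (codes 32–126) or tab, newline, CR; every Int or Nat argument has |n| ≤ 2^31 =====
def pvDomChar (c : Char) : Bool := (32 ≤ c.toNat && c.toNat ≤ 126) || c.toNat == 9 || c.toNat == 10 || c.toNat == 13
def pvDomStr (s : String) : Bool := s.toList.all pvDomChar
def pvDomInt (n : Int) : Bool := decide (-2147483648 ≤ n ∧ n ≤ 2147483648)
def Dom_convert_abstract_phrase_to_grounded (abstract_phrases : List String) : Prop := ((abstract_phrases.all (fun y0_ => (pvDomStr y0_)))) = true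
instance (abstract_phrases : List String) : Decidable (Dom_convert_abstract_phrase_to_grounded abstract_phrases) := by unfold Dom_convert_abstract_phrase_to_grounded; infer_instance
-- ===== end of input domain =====

-- B replaces A's level-by-level worklist of partially grounded sets by a direct
-- depth-first recursion over the abstraction tokens (objective: simpler, same cost).

def pvColors : List String := ["yellow", "black", "blue"]
def pvShapes : List String := ["circle", "triangle", "square"]
def pvNumbers : List String :=
  ["one", "two", "three", "four", "five", "six", "seven", "eight", "nine"]
def pvNumberStrings : PySem.Dict String String :=
  PySem.Dict.ofList [("one", "1"), ("two", "2"), ("three", "3"), ("four", "4"),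
    ("five", "5"), ("six", "6"), ("seven", "7"), ("eight", "8"), ("nine", "9"), ("ten", "10")]

-- ===== PORT A =====
-- outer 'for abstract_token in abstractions' loop body (named for readability; literal otherwise)
def pvStepA (grounded_phrases_sets : List (List String)) (abstract_token : String) :
    List (List String) :=
  grounded_phrases_sets.foldl
    (fun new_grounded_phrases_sets equivalent_set =>
      if !(equivalent_set.all (fun x => PySem.Str.isIn abstract_token x)) then
        new_grounded_phrases_sets ++ [equivalent_set]
      else
        let options :=
          if PySem.Str.isIn "COLOR" abstract_token then pvColors
          else if PySem.Str.isIn "SHAPE" abstract_token then pvShapes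
          else pvNumbers
          -- every literal abstraction reaching this branch contains "NUMBER";
          -- the 'raise NotImplementedError' case is unreachable
        let new_equivalent_sets :=
          options.foldl
            (fun nes grounding_token =>
              let s1 := equivalent_set.foldl
                (fun acc phrase =>
                  acc ++ [PySem.Str.replace phrase abstract_token grounding_token]) []
              let s2 := match pvNumberStrings.get? grounding_token with
                | some alternate_token =>
                    equivalent_set.foldl
                      (fun acc phrase =>
                        acc ++ [PySem.Str.replace phrase abstract_token alternate_token]) s1
                | none => s1
              if s2 ≠ [] then nes ++ [s2] else nes)
            []
        new_grounded_phrases_sets ++ new_equivalent_sets)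
    []

def convert_abstract_phrase_to_grounded (abstract_phrases : List String) :
    List (List String) :=
  -- copy.deepcopy is the identity on these immutable values
  (["COLOR1", "COLOR2", "SHAPE1", "SHAPE2", "NUMBER1"]).foldl pvStepA [abstract_phrases]

-- ===== PORT B =====
def pvGround : List String → List String → List (List String)
  | [], phrases => [phrases]
  | token :: rest, phrases =>
    if phrases.any (fun p => !(PySem.Str.isIn token p)) then
      pvGround rest phrases
    else
      let groups :=
        if PySem.Str.isIn "NUMBER" token then
          -- every w ∈ NUMBERS is a key of number_strings; the KeyError case is unreachable
          pvNumbers.map (fun w => [w, (pvNumberStrings.get? w).getD ""])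
        else if PySem.Str.isIn "SHAPE" token then pvShapes.map (fun w => [w])
        else pvColors.map (fun w => [w])
      groups.foldl
        (fun result group =>
          result ++ pvGround rest
            (group.flatMap (fun g => phrases.map (fun p => PySem.Str.replace p token g))))
        []

def convert_abstract_phrase_to_grounded_alt (abstract_phrases : List String) :
    List (List String) :=
  if abstract_phrases.isEmpty then []
  else pvGround ["COLOR1", "COLOR2", "SHAPE1", "SHAPE2", "NUMBER1"] abstract_phrases

-- ===== PRECONDITION & SPEC =====
def Spec_convert_abstract_phrase_to_grounded (abstract_phrases : List String) (out : List (List String)) : Prop := out = convert_abstract_phrase_to_grounded_alt abstract_phrases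
instance (abstract_phrases : List String) (out : List (List String)) : Decidable (Spec_convert_abstract_phrase_to_grounded abstract_phrases out) := by unfold Spec_convert_abstract_phrase_to_grounded; infer_instance

-- ===== CLAIM (what is proved, stated in full; the proofs are below) =====
def Claim_equal_convert_abstract_phrase_to_grounded : Prop := ∀ (abstract_phrases : List String), Dom_convert_abstract_phrase_to_grounded abstract_phrases → Spec_convert_abstract_phrase_to_grounded abstract_phrases (convert_abstract_phrase_to_grounded abstract_phrases)

-- ===== LEMMAS AND PROOFS =====

-- A's grounding of one set by one option: word replacement, then digit replacement for numbers
def pvExpandA (t g : String) (s : List String) : List String :=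
  (s.map (fun p => PySem.Str.replace p t g)) ++
    (match pvNumberStrings.get? g with
     | some a => s.map (fun p => PySem.Str.replace p t a)
     | none => [])

-- what pvStepA does to a single nonempty set
def pvChild (t : String) (s : List String) : List (List String) :=
  if s.all (fun x => PySem.Str.isIn t x) then
    (if PySem.Str.isIn "COLOR" t then pvColors
     else if PySem.Str.isIn "SHAPE" t then pvShapes
     else pvNumbers).map (fun g => pvExpandA t g s)
  else [s]

-- A's per-option inner-loop body (identical to the inner lambda in pvStepA)
def pvOptionBodyA (abstract_token : String) (equivalent_set : List String)
    (nes : List (List String)) (grounding_token : String) : List (List String) :=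
  let s1 := equivalent_set.foldl
    (fun acc phrase =>
      acc ++ [PySem.Str.replace phrase abstract_token grounding_token]) []
  let s2 := match pvNumberStrings.get? grounding_token with
    | some alternate_token =>
        equivalent_set.foldl
          (fun acc phrase =>
            acc ++ [PySem.Str.replace phrase abstract_token alternate_token]) s1
    | none => s1
  if s2 ≠ [] then nes ++ [s2] else nes

-- A's per-set loop body, named so foldl lemmas apply (identical to the body in pvStepA)
def pvBodyA (abstract_token : String) (new_grounded_phrases_sets : List (List String))
    (equivalent_set : List String) : List (List String) :=
  if !(equivalent_set.all (fun x => PySem.Str.isIn abstract_token x)) then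
    new_grounded_phrases_sets ++ [equivalent_set]
  else
    let options :=
      if PySem.Str.isIn "COLOR" abstract_token then pvColors
      else if PySem.Str.isIn "SHAPE" abstract_token then pvShapes
      else pvNumbers
    let new_equivalent_sets := options.foldl (pvOptionBodyA abstract_token equivalent_set) []
    new_grounded_phrases_sets ++ new_equivalent_sets

theorem pvStepA_def (S : List (List String)) (t : String) :
    pvStepA S t = S.foldl (pvBodyA t) [] := rfl

theorem pvExpandA_ne_nil (t g : String) (s : List String) (hs : s ≠ []) :
    pvExpandA t g s ≠ [] := by
  unfold pvExpandA
  simp [hs]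

theorem pvChild_ne_nil (t : String) (s : List String) (hs : s ≠ []) :
    ∀ s' ∈ pvChild t s, s' ≠ [] := by
  intro s' hs'
  unfold pvChild at hs'
  split at hs'
  · obtain ⟨g, -, rfl⟩ := List.mem_map.mp hs'
    exact pvExpandA_ne_nil t g s hs
  · simp at hs'; simpa [hs'] using hs

theorem pvOptionBodyA_eq (t : String) (s : List String) (hs : s ≠ []) (g : String)
    (nes : List (List String)) : pvOptionBodyA t s nes g = nes ++ [pvExpandA t g s] := by
  unfold pvOptionBodyA
  have h1 := PySem.List.foldl_append_singleton_eq_map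
    (l := s) (f := fun p => PySem.Str.replace p t g) (acc := [])
  simp only [List.nil_append] at h1
  have hval : (match pvNumberStrings.get? g with
      | some alternate_token =>
          s.foldl (fun acc phrase =>
            acc ++ [PySem.Str.replace phrase t alternate_token])
            (s.foldl (fun acc phrase =>
              acc ++ [PySem.Str.replace phrase t g]) [])
      | none => s.foldl (fun acc phrase =>
          acc ++ [PySem.Str.replace phrase t g]) []) = pvExpandA t g s := by
    cases hg : pvNumberStrings.get? g with
    | none => simp [h1, pvExpandA, hg]
    | some a =>
      have h2 := PySem.List.foldl_append_singleton_eq_map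
        (l := s) (f := fun p => PySem.Str.replace p t a)
        (acc := s.map (fun p => PySem.Str.replace p t g))
      simp [h1, h2, pvExpandA, hg]
  simp only [hval, if_pos (pvExpandA_ne_nil t g s hs)]

theorem pvBodyA_eq (t : String) (s : List String) (hs : s ≠ [])
    (acc : List (List String)) : pvBodyA t acc s = acc ++ pvChild t s := by
  unfold pvBodyA pvChild
  by_cases hall : s.all (fun x => PySem.Str.isIn t x) = true
  · simp only [hall, Bool.not_true, Bool.false_eq_true, if_false, if_true]
    congr 1
    rw [PySem.List.foldl_congr_mem' _ _ (fun nes g => nes ++ [pvExpandA t g s]) _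
          (fun g _ nes => pvOptionBodyA_eq t s hs g nes),
        PySem.List.foldl_append_singleton_eq_map]
    simp
  · rw [if_pos (show (!(s.all fun x => PySem.Str.isIn t x)) = true by
          rw [Bool.eq_false_iff.mpr hall]; rfl),
        if_neg hall]

theorem pvStepA_eq (t : String) (S : List (List String)) (hS : ∀ s ∈ S, s ≠ []) :
    pvStepA S t = S.flatMap (pvChild t) := by
  rw [pvStepA_def,
      PySem.List.foldl_congr_mem' _ _ (fun acc s => acc ++ pvChild t s) _
        (fun s hsS acc => pvBodyA_eq t s (hS s hsS) acc),
      PySem.List.foldl_append_eq_flatMap]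
  simp

theorem pvAny_not_eq (t : String) (s : List String) :
    (s.any (fun p => !(PySem.Str.isIn t p))) = !(s.all (fun x => PySem.Str.isIn t x)) := by
  induction s with
  | nil => rfl
  | cons p ps ih =>
    simp only [List.any_cons, List.all_cons, Bool.not_and, ih]

theorem pvExpandA_none (t g : String) (s : List String)
    (hg : pvNumberStrings.get? g = none) :
    pvExpandA t g s = s.map (fun p => PySem.Str.replace p t g) := by
  unfold pvExpandA; rw [hg]; simp

theorem pvExpandA_some (t g a : String) (s : List String)
    (hg : pvNumberStrings.get? g = some a) :
    pvExpandA t g s = s.map (fun p => PySem.Str.replace p t g) ++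
      s.map (fun p => PySem.Str.replace p t a) := by
  unfold pvExpandA; rw [hg]

theorem pvWordGroups (t : String) (rest s : List String) (opts : List String)
    (hnone : ∀ g ∈ opts, pvNumberStrings.get? g = none) :
    ((opts.map (fun w => [w])).foldl (fun result group =>
        result ++ pvGround rest
          (group.flatMap (fun g => s.map (fun p => PySem.Str.replace p t g)))) [])
    = (opts.map (fun g => pvExpandA t g s)).flatMap (pvGround rest) := by
  rw [PySem.List.foldl_append_eq_flatMap, List.flatMap_map, List.flatMap_map]
  simp only [List.nil_append]
  apply List.flatMap_congr
  intro g hg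
  rw [pvExpandA_none t g s (hnone g hg)]
  simp

theorem pvNumGroups (t : String) (rest s : List String) :
    ((pvNumbers.map (fun w => [w, (pvNumberStrings.get? w).getD ""])).foldl
        (fun result group =>
          result ++ pvGround rest
            (group.flatMap (fun g => s.map (fun p => PySem.Str.replace p t g)))) [])
    = (pvNumbers.map (fun g => pvExpandA t g s)).flatMap (pvGround rest) := by
  have hsome : ∀ g ∈ pvNumbers,
      pvNumberStrings.get? g = some ((pvNumberStrings.get? g).getD "") := by decide
  rw [PySem.List.foldl_append_eq_flatMap, List.flatMap_map, List.flatMap_map]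
  simp only [List.nil_append]
  apply List.flatMap_congr
  intro g hg
  rw [pvExpandA_some t g _ s (hsome g hg)]
  simp

theorem pvChild_flatMap_ground (t : String)
    (ht : t ∈ ["COLOR1", "COLOR2", "SHAPE1", "SHAPE2", "NUMBER1"])
    (rest : List String) (s : List String) :
    (pvChild t s).flatMap (pvGround rest) = pvGround (t :: rest) s := by
  rw [pvGround, pvAny_not_eq]
  by_cases hall : s.all (fun x => PySem.Str.isIn t x) = true
  · simp only [hall, Bool.not_true, Bool.false_eq_true, if_false]
    unfold pvChild
    rw [if_pos hall]
    fin_cases ht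
    · simp only [show PySem.Str.isIn "NUMBER" "COLOR1" = false from by decide,
        show PySem.Str.isIn "SHAPE" "COLOR1" = false from by decide,
        show PySem.Str.isIn "COLOR" "COLOR1" = true from by decide,
        Bool.false_eq_true, if_false, if_true]
      exact (pvWordGroups "COLOR1" rest s pvColors (by decide)).symm
    · simp only [show PySem.Str.isIn "NUMBER" "COLOR2" = false from by decide,
        show PySem.Str.isIn "SHAPE" "COLOR2" = false from by decide,
        show PySem.Str.isIn "COLOR" "COLOR2" = true from by decide,
        Bool.false_eq_true, if_false, if_true]
      exact (pvWordGroups "COLOR2" rest s pvColors (by decide)).symm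
    · simp only [show PySem.Str.isIn "NUMBER" "SHAPE1" = false from by decide,
        show PySem.Str.isIn "SHAPE" "SHAPE1" = true from by decide,
        show PySem.Str.isIn "COLOR" "SHAPE1" = false from by decide,
        Bool.false_eq_true, if_false, if_true]
      exact (pvWordGroups "SHAPE1" rest s pvShapes (by decide)).symm
    · simp only [show PySem.Str.isIn "NUMBER" "SHAPE2" = false from by decide,
        show PySem.Str.isIn "SHAPE" "SHAPE2" = true from by decide,
        show PySem.Str.isIn "COLOR" "SHAPE2" = false from by decide,
        Bool.false_eq_true, if_false, if_true]
      exact (pvWordGroups "SHAPE2" rest s pvShapes (by decide)).symm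
    · simp only [show PySem.Str.isIn "NUMBER" "NUMBER1" = true from by decide,
        show PySem.Str.isIn "SHAPE" "NUMBER1" = false from by decide,
        show PySem.Str.isIn "COLOR" "NUMBER1" = false from by decide,
        Bool.false_eq_true, if_false, if_true]
      exact (pvNumGroups "NUMBER1" rest s).symm
  · simp only [Bool.eq_false_iff.mpr hall, Bool.not_false, if_true]
    unfold pvChild
    rw [if_neg hall]
    simp

theorem pvFoldl_stepA_eq (tokens : List String)
    (htk : ∀ t ∈ tokens, t ∈ ["COLOR1", "COLOR2", "SHAPE1", "SHAPE2", "NUMBER1"]) :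
    ∀ S : List (List String), (∀ s ∈ S, s ≠ []) →
      tokens.foldl pvStepA S = S.flatMap (pvGround tokens) := by
  induction tokens with
  | nil => intro S _; simp [pvGround]
  | cons t ts ih =>
    intro S hS
    have hne : ∀ s' ∈ S.flatMap (pvChild t), s' ≠ [] := by
      intro s' hs'
      obtain ⟨s, hsS, hmem⟩ := List.mem_flatMap.mp hs'
      exact pvChild_ne_nil t s (hS s hsS) s' hmem
    calc (t :: ts).foldl pvStepA S
        = ts.foldl pvStepA (pvStepA S t) := rfl
      _ = (S.flatMap (pvChild t)).flatMap (pvGround ts) := by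
          rw [pvStepA_eq t S hS]
          exact ih (fun x hx => htk x (List.mem_cons_of_mem _ hx)) _ hne
      _ = S.flatMap (fun s => (pvChild t s).flatMap (pvGround ts)) := by
          rw [List.flatMap_assoc]
      _ = S.flatMap (pvGround (t :: ts)) := by
          apply List.flatMap_congr
          intro s _
          exact pvChild_flatMap_ground t (htk t (List.mem_cons_self ..)) ts s

-- ===== VERDICT (by name: the statement is the Claim_ definition above) =====
theorem convert_abstract_phrase_to_grounded_spec : Claim_equal_convert_abstract_phrase_to_grounded := by
  intro abstract_phrases _
  unfold Spec_convert_abstract_phrase_to_grounded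
  cases habs : abstract_phrases with
  | nil => decide
  | cons p ps =>
    unfold convert_abstract_phrase_to_grounded convert_abstract_phrase_to_grounded_alt
    rw [pvFoldl_stepA_eq _ (by intro t ht; exact ht) [p :: ps] (by simp)]
    simp
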